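-- pv_equiv track=rewrite | github.com/rvirjn/ASSIGNMENT2_BLR_B2_G09 | AS2_PS4_AP_G09.py | unique_allocation
-- ===== SOURCE A (Python) =====
-- def unique_allocation(students_pref, student_index, elected_topics):
--     """
--     Finds the number of possible allocations possible from the current student's position till the last student
--
--     :param students_pref: eg [[s1 pref],[s2 pref],...]
--     :param student_index: Current student's index for whom we should elect a suitable elective.
--     :param elected_topics: List of topics which are chosen by previous students
--     :return: Number of allocations
--     """
--     if student_index >= len(students_pref):
--         return 1
--     # end of If
--
--     return_val = 0
--
--     for t in students_pref[student_index]: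
--         if t not in elected_topics:
--             local_topics = elected_topics[:]
--             local_topics.append(t)
--             return_val += unique_allocation(students_pref, student_index + 1, local_topics)
--         # End of If
--     # End of For
--     return return_val
-- ===== SOURCE B (Python) =====
-- def unique_allocation(students_pref, student_index, elected_topics):
--     """
--     Same count, computed by top-down dynamic programming memoised on
--     (position, frozenset of taken topics): identical sub-problems reached
--     along different allocation orders are solved once.
--     """
--     n = len(students_pref)
--     memo = {}
--
--     def count(i, taken):
--         if i >= n:
--             return 1
--         key = (i, tuple(sorted(taken)))
--         if key in memo:
--             return memo[key]
--         total = 0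
--         for t in students_pref[i]:
--             if t not in taken:
--                 total += count(i + 1, taken | {t})
--         memo[key] = total
--         return total
--
--     return count(student_index, frozenset(elected_topics))
-- ===== Notes on version B (the rewrite author's own statement) =====
-- stated objective: alternative
-- what changed: Replaces the naive tree recursion by top-down dynamic programming memoised on (student position, set of already-taken topics), so identical sub-problems reached along different allocation orders are solved once.
import Mathlib
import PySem

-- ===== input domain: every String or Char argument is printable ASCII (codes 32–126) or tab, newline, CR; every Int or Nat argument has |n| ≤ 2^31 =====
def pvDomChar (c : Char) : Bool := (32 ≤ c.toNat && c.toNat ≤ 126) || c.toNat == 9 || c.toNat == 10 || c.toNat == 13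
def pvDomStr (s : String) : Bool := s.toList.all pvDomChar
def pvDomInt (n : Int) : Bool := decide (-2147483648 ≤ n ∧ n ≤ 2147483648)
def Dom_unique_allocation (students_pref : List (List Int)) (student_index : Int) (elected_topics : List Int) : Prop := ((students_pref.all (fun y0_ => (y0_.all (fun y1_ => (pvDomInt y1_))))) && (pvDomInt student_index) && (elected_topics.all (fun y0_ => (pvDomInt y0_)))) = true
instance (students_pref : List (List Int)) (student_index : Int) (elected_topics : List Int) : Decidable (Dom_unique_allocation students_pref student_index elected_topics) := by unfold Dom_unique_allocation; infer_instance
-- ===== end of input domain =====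

-- B replaces A's naive tree recursion by the same count memoised on (position, set of
-- taken topics), solving each reachable sub-problem once. Proven: equal wherever A returns.


-- ===== PORT A =====
-- Literal port of A's recursion; inside Pre_ the pyGetD default [] is never used
-- (Python raises exactly where pyGet? would be none, excluded by Pre_).
def unique_allocation (students_pref : List (List Int)) (student_index : Int) (elected_topics : List Int) : Int :=
  if student_index ≥ (students_pref.length : Int) then 1
  else
    (PySem.List.pyGetD students_pref student_index []).foldl
      (fun return_val t =>
        if elected_topics.contains t then return_val
        else return_val + unique_allocation students_pref (student_index + 1) (elected_topics ++ [t]))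
      0
termination_by ((students_pref.length : Int) - student_index).toNat
decreasing_by omega

-- ===== PORT B =====
-- key = (i, tuple(sorted(taken)))
def uaCanon (taken : PySem.Set Int) : List Int := PySem.List.sorted taken (fun x => x) false

-- B's inner `count`, threading the memo dictionary through the loop.
def uaCount (students_pref : List (List Int)) (i : Int) (taken : PySem.Set Int)
    (memo : PySem.Dict (Int × List Int) Int) : Int × PySem.Dict (Int × List Int) Int :=
  if i ≥ (students_pref.length : Int) then (1, memo)
  else
    let key := (i, uaCanon taken)
    match memo.get? key with
    | some v => (v, memo)
    | none =>
      let p := (PySem.List.pyGetD students_pref i []).foldl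
        (fun pm t =>
          if PySem.Set.contains taken t then pm
          else
            let r := uaCount students_pref (i + 1) (PySem.Set.add taken t) pm.2
            (pm.1 + r.1, r.2))
        (0, memo)
      (p.1, p.2.insert key p.1)
termination_by ((students_pref.length : Int) - i).toNat
decreasing_by omega

def unique_allocation_alt (students_pref : List (List Int)) (student_index : Int) (elected_topics : List Int) : Int :=
  (uaCount students_pref student_index (PySem.Set.ofList elected_topics) PySem.Dict.empty).1

-- ===== PRECONDITION & SPEC =====
-- Pre_ excludes exactly the inputs where Python A raises IndexError
-- (student_index below -len(students_pref): the wrap-around index is out of range).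
def Pre_unique_allocation (students_pref : List (List Int)) (student_index : Int) (elected_topics : List Int) : Prop :=
  -(students_pref.length : Int) ≤ student_index
instance (students_pref : List (List Int)) (student_index : Int) (elected_topics : List Int) : Decidable (Pre_unique_allocation students_pref student_index elected_topics) := by unfold Pre_unique_allocation; infer_instance

def pvWitness_unique_allocation : List (List Int) × Int × List Int := ([[1, 2], [1, 3]], 0, [3])

def Spec_unique_allocation (students_pref : List (List Int)) (student_index : Int) (elected_topics : List Int) (out : Int) : Prop := out = unique_allocation_alt students_pref student_index elected_topics
instance (students_pref : List (List Int)) (student_index : Int) (elected_topics : List Int) (out : Int) : Decidable (Spec_unique_allocation students_pref student_index elected_topics out) := by unfold Spec_unique_allocation; infer_instance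

-- ===== CLAIM (what is proved, stated in full; the proofs are below) =====
def Claim_equal_unique_allocation : Prop := ∀ (students_pref : List (List Int)) (student_index : Int) (elected_topics : List Int), Dom_unique_allocation students_pref student_index elected_topics → Pre_unique_allocation students_pref student_index elected_topics → Spec_unique_allocation students_pref student_index elected_topics (unique_allocation students_pref student_index elected_topics)

-- ===== LEMMAS AND PROOFS =====

-- A's value depends on elected_topics only through membership.
theorem uaA_congr (sp : List (List Int)) :
    ∀ (k : Nat) (i : Int) (el el' : List Int),
      (((sp.length : Int) - i).toNat ≤ k) →
      (∀ x, x ∈ el ↔ x ∈ el') →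
      unique_allocation sp i el = unique_allocation sp i el' := by
  intro k
  induction k with
  | zero =>
    intro i el el' hk _
    rw [unique_allocation, unique_allocation]
    have : i ≥ (sp.length : Int) := by omega
    simp [this]
  | succ k ih =>
    intro i el el' hk hmem
    rw [unique_allocation, unique_allocation]
    by_cases hge : i ≥ (sp.length : Int)
    · simp [hge]
    · simp only [hge, if_false]
      apply PySem.List.foldl_congr_mem
      intro acc t ht
      by_cases hx : t ∈ el'
      · have hx2 : t ∈ el := (hmem t).mpr hx
        simp [hx, hx2]
      · have hx2 : t ∉ el := fun h => hx ((hmem t).mp h)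
        have hrec := ih (i + 1) (el ++ [t]) (el' ++ [t]) (by omega)
          (fun x => by simp [hmem x])
        simp [hx, hx2, hrec]

def uaGood (sp : List (List Int)) (memo : PySem.Dict (Int × List Int) Int) : Prop :=
  ∀ j l v, memo.get? (j, l) = some v →
    ∀ s : List Int, s.Nodup → uaCanon s = l → v = unique_allocation sp j s

theorem uaFold (sp : List (List Int)) (k : Nat) (i : Int) (taken : PySem.Set Int)
    (hnd : taken.Nodup) (hk : ((sp.length : Int) - i).toNat ≤ k + 1)
    (_hge : ¬ i ≥ (sp.length : Int))
    (ih : ∀ (i' : Int) (taken' : PySem.Set Int) (memo' : PySem.Dict (Int × List Int) Int),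
      ((sp.length : Int) - i').toNat ≤ k → taken'.Nodup → uaGood sp memo' →
      (uaCount sp i' taken' memo').1 = unique_allocation sp i' taken' ∧
      uaGood sp (uaCount sp i' taken' memo').2) :
    ∀ (prefs : List Int) (acc : Int) (m : PySem.Dict (Int × List Int) Int), uaGood sp m →
      (prefs.foldl
        (fun pm t =>
          if PySem.Set.contains taken t then pm
          else
            let r := uaCount sp (i + 1) (PySem.Set.add taken t) pm.2
            (pm.1 + r.1, r.2))
        (acc, m)).1
        = prefs.foldl
          (fun return_val t =>
            if taken.contains t then return_val
            else return_val + unique_allocation sp (i + 1) (taken ++ [t])) acc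
      ∧ uaGood sp (prefs.foldl
        (fun pm t =>
          if PySem.Set.contains taken t then pm
          else
            let r := uaCount sp (i + 1) (PySem.Set.add taken t) pm.2
            (pm.1 + r.1, r.2))
        (acc, m)).2 := by
  intro prefs
  induction prefs with
  | nil => intro acc m hm; exact ⟨rfl, hm⟩
  | cons t rest ihp =>
    intro acc m hm
    simp only [List.foldl_cons]
    by_cases hc : PySem.Set.contains taken t = true
    · have hc2 : taken.contains t = true := by simpa using hc
      rw [if_pos hc, if_pos hc2]
      exact ihp acc m hm
    · have hc2 : ¬ taken.contains t = true := by simpa using hc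
      have ht : t ∉ taken := by simpa using hc2
      have hadd : PySem.Set.add taken t = taken ++ [t] := by
        simp only [PySem.Set.add]
        rw [if_neg hc]
      have hnd2 : (PySem.Set.add taken t).Nodup := by
        rw [hadd, List.nodup_append_comm, List.singleton_append]
        exact List.nodup_cons.mpr ⟨ht, hnd⟩
      have hrec := ih (i + 1) (PySem.Set.add taken t) m (by omega) hnd2 hm
      rw [hadd] at hrec
      rw [if_neg hc, if_neg hc2]
      rw [hadd]
      rw [hrec.1]
      exact ihp _ _ hrec.2

theorem uaCount_main (sp : List (List Int)) :
    ∀ (k : Nat) (i : Int) (taken : PySem.Set Int) (memo : PySem.Dict (Int × List Int) Int),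
      (((sp.length : Int) - i).toNat ≤ k) →
      taken.Nodup → uaGood sp memo →
      (uaCount sp i taken memo).1 = unique_allocation sp i taken ∧
      uaGood sp (uaCount sp i taken memo).2 := by
  intro k
  induction k with
  | zero =>
    intro i taken memo hk hnd hg
    have hge : i ≥ (sp.length : Int) := by omega
    rw [uaCount, unique_allocation]
    simp [hge, hg]
  | succ k ih =>
    intro i taken memo hk hnd hg
    rw [uaCount]
    by_cases hge : i ≥ (sp.length : Int)
    · rw [unique_allocation]; simp [hge, hg]
    · simp only [hge, if_false]
      cases hv : memo.get? (i, uaCanon taken) with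
      | some v =>
        exact ⟨hg i _ v hv taken hnd rfl, hg⟩
      | none =>
        obtain ⟨h1, h2⟩ := uaFold sp k i taken hnd hk hge ih (PySem.List.pyGetD sp i []) 0 memo hg
        have hP : ((PySem.List.pyGetD sp i []).foldl
            (fun pm t =>
              if PySem.Set.contains taken t then pm
              else
                let r := uaCount sp (i + 1) (PySem.Set.add taken t) pm.2
                (pm.1 + r.1, r.2))
            (0, memo)).1 = unique_allocation sp i taken := by
          rw [unique_allocation]
          rw [if_neg hge]
          exact h1
        constructor
        · exact hP
        · intro j l v hget s hsnd hcs
          rw [PySem.Dict.get?_insert] at hget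
          by_cases hkey : ((j, l) : Int × List Int) = (i, uaCanon taken)
          · rw [if_pos hkey] at hget
            have hj : j = i := congrArg Prod.fst hkey
            have hl : l = uaCanon taken := congrArg Prod.snd hkey
            have hperm : s.Perm taken :=
              (PySem.List.sorted_id_eq_sorted_id_iff_perm s taken).mp (hcs.trans hl)
            have hv2 : v = _ := (Option.some.inj hget).symm
            rw [hj]
            exact hv2.trans (hP.trans
              (uaA_congr sp (((sp.length : Int) - i).toNat) i taken s le_rfl
                (fun x => hperm.symm.mem_iff)))
          · rw [if_neg hkey] at hget
            exact h2 j l v hget s hsnd hcs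

-- ===== VERDICT (by name: the statement is the Claim_ definition above) =====
theorem unique_allocation_spec : Claim_equal_unique_allocation := by
  intro sp i el _ _
  unfold Spec_unique_allocation unique_allocation_alt
  have h := (uaCount_main sp (((sp.length : Int) - i).toNat) i (PySem.Set.ofList el)
      PySem.Dict.empty le_rfl (PySem.Set.nodup_ofList el)
      (by intro j l v hv; simp [PySem.Dict.get?_empty] at hv)).1
  rw [h]
  exact (uaA_congr sp (((sp.length : Int) - i).toNat) i (PySem.Set.ofList el) el le_rfl
      (fun x => PySem.Set.mem_ofList el x)).symm
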